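-- pv_equiv track=rewrite | github.com/andirs/rs2018 | src/tools/metrics/recsys_metrics.py | rsc
-- ===== SOURCE A (Python) =====
-- def rsc(ground_truth, prediction):
--     """
--     Recommended Songs is a Spotify feature that, given a set of
--     tracks in a playlist, recommends 10 tracks to add to the playlist.
--     The list can be refreshed to produce 10 more tracks.
--     Recommended Songs clicks is the number of refreshes
--     needed before a relevant track is encountered
--
--     Parameters:
--     ------------
--     ground_truth: list of elements representing relevant recommendations. Usually a list of elements that have been hidden from a particular playlist.
--     prediction: list of predictions a given algorithm returns.
--
--     Returns:
--     ------------
--     counter: amount of clicks needed for the first relevant song to appear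
--     """
--     counter = 0
--     for idx, track in enumerate(prediction):
--         if idx % 10 == 0:
--             counter += 1
--         if track in ground_truth:
--             return counter
--     return counter + 1
-- ===== SOURCE B (Python) =====
-- def rsc(ground_truth, prediction):
--     clicks = 0
--     while prediction:
--         page, prediction = prediction[:10], prediction[10:]
--         clicks += 1
--         if any(t in ground_truth for t in page):
--             return clicks
--     return clicks + 1
-- ===== Notes on version B (the rewrite author's own statement) =====
-- stated objective: alternative
-- what changed: Replaces A's per-element scan with a modular index counter by a page-wise loop that slices the prediction into pages of 10 and counts pages fetched until one contains a relevant track.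
import Mathlib
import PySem

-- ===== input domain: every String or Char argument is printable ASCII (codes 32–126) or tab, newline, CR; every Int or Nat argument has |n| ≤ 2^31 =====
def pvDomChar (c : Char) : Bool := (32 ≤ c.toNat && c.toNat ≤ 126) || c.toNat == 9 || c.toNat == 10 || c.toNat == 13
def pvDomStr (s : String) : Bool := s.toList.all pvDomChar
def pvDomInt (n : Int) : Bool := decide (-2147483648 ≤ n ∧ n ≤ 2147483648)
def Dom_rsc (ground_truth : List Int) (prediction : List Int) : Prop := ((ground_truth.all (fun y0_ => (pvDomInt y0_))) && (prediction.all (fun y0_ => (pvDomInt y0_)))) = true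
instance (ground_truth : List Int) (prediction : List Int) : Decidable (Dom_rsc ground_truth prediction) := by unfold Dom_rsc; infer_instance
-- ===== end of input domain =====

-- B replaces A's per-element scan with a modular index counter by a page-wise loop over
-- slices of 10 tracks, counting pages until one contains a relevant track (objective: alternative).

-- ===== PORT A =====
-- A's loop: idx is the enumerate index, counter the running click count;
-- the empty-suffix case is the final 'return counter + 1'.
def rscLoop (ground_truth : List Int) : List Int → Nat → Int → Int
  | [], _, counter => counter + 1
  | track :: rest, idx, counter =>
      let counter := if idx % 10 == 0 then counter + 1 else counter
      if ground_truth.contains track then counter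
      else rscLoop ground_truth rest (idx + 1) counter

def rsc (ground_truth : List Int) (prediction : List Int) : Int :=
  rscLoop ground_truth prediction 0 0

-- ===== PORT B =====
-- B's while loop: slice off a page of 10 (prediction[:10]/prediction[10:] — both slice
-- bounds are the nonnegative literal 10, so List.take/List.drop are exact), bump clicks,
-- return if the page holds a relevant track.
def rscPages (gt : List Int) : List Int → Int → Int
  | [], clicks => clicks + 1
  | t :: rest, clicks =>
      let page := (t :: rest).take 10
      let rest' := (t :: rest).drop 10
      if page.any (fun x => gt.contains x) then clicks + 1
      else rscPages gt rest' (clicks + 1)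
  termination_by l _ => l.length
  decreasing_by simp

def rsc_alt (ground_truth : List Int) (prediction : List Int) : Int :=
  rscPages ground_truth prediction 0

-- ===== PRECONDITION & SPEC =====
def Spec_rsc (ground_truth : List Int) (prediction : List Int) (out : Int) : Prop := out = rsc_alt ground_truth prediction
instance (ground_truth : List Int) (prediction : List Int) (out : Int) : Decidable (Spec_rsc ground_truth prediction out) := by unfold Spec_rsc; infer_instance

-- ===== CLAIM =====
def Claim_equal_rsc : Prop := ∀ (ground_truth : List Int) (prediction : List Int), Dom_rsc ground_truth prediction → Spec_rsc ground_truth prediction (rsc ground_truth prediction)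

-- ===== LEMMAS AND PROOFS =====

-- Inside a page (no index divisible by 10 among the next k), A's loop returns the
-- unchanged counter if a relevant track is among the next k elements, else skips them.
theorem rscLoop_page (gt : List Int) :
    ∀ (k : Nat) (l : List Int) (idx : Nat) (c : Int),
    (∀ j, j < k → (idx + j) % 10 ≠ 0) →
    rscLoop gt l idx c =
      if (l.take k).any (fun x => gt.contains x) then c
      else rscLoop gt (l.drop k) (idx + k) c := by
  intro k
  induction k with
  | zero => intro l idx c _; simp
  | succ k ih =>
      intro l idx c h
      cases l with
      | nil => simp [rscLoop]
      | cons t rest =>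
          have h0 : idx % 10 ≠ 0 := by simpa using h 0 (by omega)
          simp only [rscLoop, List.take_succ_cons, List.any_cons, List.drop_succ_cons]
          have hc : (if idx % 10 == 0 then c + 1 else c) = c := by simp [h0]
          rw [hc]
          by_cases hm : gt.contains t
          · have hm' : t ∈ gt := by simpa using hm
            simp [hm']
          · simp only [hm, Bool.false_or, if_false, Bool.false_eq_true]
            rw [ih rest (idx + 1) c (by intro j hj; have := h (j + 1) (by omega); omega)]
            have he : idx + 1 + k = idx + (k + 1) := by omega
            rw [he]

-- At a page boundary (idx divisible by 10), A's loop computes B's page loop.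
theorem rscLoop_eq_pages (gt : List Int) :
    ∀ (n : Nat) (l : List Int) (idx : Nat) (c : Int),
    l.length ≤ n → idx % 10 = 0 →
    rscLoop gt l idx c = rscPages gt l c := by
  intro n
  induction n with
  | zero =>
      intro l idx c hn _
      cases l with
      | nil => rw [rscPages.eq_def]; simp [rscLoop]
      | cons t rest => simp at hn
  | succ n ih =>
      intro l idx c hn hidx
      cases l with
      | nil => rw [rscPages.eq_def]; simp [rscLoop]
      | cons t rest =>
          rw [rscPages.eq_def]
          simp only [rscLoop, List.take_succ_cons, List.any_cons, List.drop_succ_cons]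
          have hc : (if idx % 10 == 0 then c + 1 else c) = c + 1 := by simp [hidx]
          rw [hc]
          by_cases hm : gt.contains t
          · have hm' : t ∈ gt := by simpa using hm
            simp [hm']
          · simp only [hm, Bool.false_or, if_false, Bool.false_eq_true]
            rw [rscLoop_page gt 9 rest (idx + 1) (c + 1) (by intro j hj; omega)]
            by_cases ha : (rest.take 9).any (fun x => gt.contains x)
            · have ha' : ∃ x ∈ List.take 9 rest, x ∈ gt := by simpa using ha
              simp [ha']
            · simp only [ha, if_false, Bool.false_eq_true]
              rw [ih (rest.drop 9) (idx + 1 + 9) (c + 1)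
                (by simp at hn ⊢; omega) (by omega)]

-- ===== VERDICT =====
theorem rsc_spec : Claim_equal_rsc := by
  intro gt pred _
  show rsc gt pred = rsc_alt gt pred
  exact rscLoop_eq_pages gt pred.length pred 0 0 le_rfl rfl
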